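-- pv_equiv track=rewrite | github.com/EliTheCreator/AdventOfCode | 2018/day08/test.py | parse
-- ===== SOURCE A (Python) =====
-- def parse(data):
--     children, metas = data[:2]
--     data = data[2:]
--     scores = []
--     totals = 0
--
--     for _ in range(children):
--         total, score, data = parse(data)
--         totals += total
--         scores.append(score)
--
--     totals += sum(data[:metas])
--
--     if children == 0:
--         return (totals, sum(data[:metas]), data[metas:])
--     else:
--         return (
--             totals,
--             sum(scores[k - 1]
--                 for k in data[:metas] if k > 0 and k <= len(scores)),
--             data[metas:]
--         )
-- ===== SOURCE B (Python) =====
-- def parse(data):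
--     # Iterative re-implementation: explicit stack of node frames, one pass over the list.
--     totals = 0
--     rest = data
--     children, metas = rest[:2]
--     rest = rest[2:]
--     stack = [(children, metas, [])]
--     while True:
--         children, metas, scores = stack[-1]
--         if len(scores) < children:
--             c, m = rest[:2]
--             rest = rest[2:]
--             stack.append((c, m, []))
--         else:
--             md = rest[:metas]
--             rest = rest[metas:]
--             totals += sum(md)
--             if children == 0:
--                 value = sum(md)
--             else:
--                 value = sum(scores[k - 1] for k in md if k > 0 and k <= len(scores))
--             stack.pop()
--             if not stack:
--                 return (totals, value, rest)
--             stack[-1][2].append(value)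
-- ===== Notes on version B (the rewrite author's own statement) =====
-- stated objective: alternative
-- what changed: Replaces A's recursion (one call per tree node, re-threading the remainder through nested calls) with a single iterative pass driven by an explicit stack of (children, metas, scores) frames, popping a frame when all its children are finished.
import Mathlib
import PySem

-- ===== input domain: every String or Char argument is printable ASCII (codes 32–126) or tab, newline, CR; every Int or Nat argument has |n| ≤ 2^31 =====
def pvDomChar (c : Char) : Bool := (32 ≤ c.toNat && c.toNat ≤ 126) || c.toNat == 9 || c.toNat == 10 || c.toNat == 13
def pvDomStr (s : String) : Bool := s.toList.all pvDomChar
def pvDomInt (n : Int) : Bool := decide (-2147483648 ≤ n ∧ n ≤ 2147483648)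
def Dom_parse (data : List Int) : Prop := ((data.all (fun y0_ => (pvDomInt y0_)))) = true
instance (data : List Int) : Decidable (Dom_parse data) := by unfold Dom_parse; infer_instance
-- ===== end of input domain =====

-- B re-implements the recursive AoC day-8 tree parser as an iterative single pass with an
-- explicit stack of node frames (alternative decomposition; same return value wherever A returns).

-- ===== PORT A =====
-- xs[:m] and xs[m:] (Python slices, clamping, negative bounds)
def pyTakeI (xs : List Int) (m : Int) : List Int := PySem.List.slice xs none (some m)
def pyDropI (xs : List Int) (m : Int) : List Int := PySem.List.slice xs (some m) none

-- value of a node: leaf (children == 0) = sum of metadata; internal = sum of scores[k-1]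
-- for k in metadata with 0 < k <= len(scores)  (identical expression in both Pythons)
def nodeValue (c : Int) (scores md : List Int) : Int :=
  if c == 0 then md.sum
  else ((md.filter (fun k => decide (0 < k) && decide (k ≤ (scores.length : Int)))).map
          (fun k => (PySem.List.pyGet? scores (k - 1)).getD 0)).sum

-- the 'for _ in range(children)' loop of A, child = recursive call at the current fuel
def kidsF (child : List Int → Option (Int × Int × List Int)) :
    Nat → Int → List Int → List Int → Option (Int × List Int × List Int)
  | 0, totals, scores, rest => some (totals, scores, rest)
  | n + 1, totals, scores, rest =>
    match child rest with
    | none => none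
    | some (t, s, r) => kidsF child n (totals + t) (scores ++ [s]) r

-- A's recursion, fuel-indexed (none = the Python raises / fuel exhausted; fuel below suffices
-- on every input where the Python returns)
def parseF : Nat → List Int → Option (Int × Int × List Int)
  | 0, _ => none
  | f + 1, c :: m :: rest =>
    match kidsF (parseF f) c.toNat 0 [] rest with
    | none => none
    | some (totals, scores, d) =>
      some (totals + (pyTakeI d m).sum, nodeValue c scores (pyTakeI d m), pyDropI d m)
  | _ + 1, _ => none

def parse (data : List Int) : Int × Int × List Int :=
  (parseF (data.length + 1) data).getD (0, 0, [])

-- ===== PORT B =====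
-- one frame = (children, metas, scores-of-finished-children); fuel counts loop iterations
-- (none = the Python raises / fuel exhausted; the fuel passed below suffices whenever B returns)
def runB : Nat → Int → List Int → List (Int × Int × List Int) → Option (Int × Int × List Int)
  | 0, _, _, _ => none
  | f + 1, totals, rest, stack =>
    match stack with
    | [] => none
    | (c, m, scores) :: tl =>
      if (scores.length : Int) < c then
        match rest with
        | a :: b :: r2 => runB f totals r2 ((a, b, ([] : List Int)) :: (c, m, scores) :: tl)
        | _ => none
      else
        match tl with
        | [] => some (totals + (pyTakeI rest m).sum, nodeValue c scores (pyTakeI rest m),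
                      pyDropI rest m)
        | (c2, m2, s2) :: tl2 =>
          runB f (totals + (pyTakeI rest m).sum) (pyDropI rest m)
            ((c2, m2, s2 ++ [nodeValue c scores (pyTakeI rest m)]) :: tl2)

def parse_alt (data : List Int) : Int × Int × List Int :=
  match data with
  | c :: m :: rest => (runB (rest.length + 3) 0 rest [(c, m, ([] : List Int))]).getD (0, 0, [])
  | _ => (0, 0, [])

-- ===== PRECONDITION & SPEC =====
-- Pre_parse holds iff data is a complete tree serialization (every node header of 2 ints is
-- present): exactly the inputs on which the Python A returns instead of raising ValueError.
-- The grammar is recursive, so the check is a structural walk over the headers; its depth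
-- bound data.length+1 is never the reason it fails (each node consumes ≥ 2 elements).
def wfKids (child : List Int → Option (List Int)) : Nat → List Int → Option (List Int)
  | 0, r => some r
  | n + 1, r =>
    match child r with
    | none => none
    | some r1 => wfKids child n r1

def wfNode : Nat → List Int → Option (List Int)
  | 0, _ => none
  | f + 1, c :: m :: rest => (wfKids (wfNode f) c.toNat rest).map (fun d => pyDropI d m)
  | _ + 1, _ => none

def Pre_parse (data : List Int) : Prop := (wfNode (data.length + 1) data).isSome = true
instance (data : List Int) : Decidable (Pre_parse data) := by unfold Pre_parse; infer_instance

def pvWitness_parse : List Int := [2, 3, 0, 3, 10, 11, 12, 1, 1, 0, 1, 99, 2, 1, 1, 2]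

def Spec_parse (data : List Int) (out : Int × Int × List Int) : Prop := out = parse_alt data
instance (data : List Int) (out : Int × Int × List Int) : Decidable (Spec_parse data out) := by
  unfold Spec_parse; infer_instance

-- ===== CLAIM (what is proved, stated in full; the proofs are below) =====
def Claim_equal_parse : Prop :=
  ∀ (data : List Int), Dom_parse data → Pre_parse data → Spec_parse data (parse data)

-- ===== LEMMAS AND PROOFS =====

theorem pyDropI_len (xs : List Int) (m : Int) : (pyDropI xs m).length ≤ xs.length := by
  simp [pyDropI, PySem.List.slice_some_none]

theorem kidsF_scores_len (child : List Int → Option (Int × Int × List Int)) :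
    ∀ (n : Nat) (t0 : Int) (s0 rest : List Int) (T : Int) (Sc R : List Int),
      kidsF child n t0 s0 rest = some (T, Sc, R) → Sc.length = s0.length + n := by
  intro n
  induction n with
  | zero => intro t0 s0 rest T Sc R h; simp [kidsF] at h; simp [h.2.1]
  | succ n ih =>
    intro t0 s0 rest T Sc R h
    simp only [kidsF] at h
    cases hp : child rest with
    | none => rw [hp] at h; exact absurd h (by simp)
    | some p =>
      obtain ⟨t, s, r⟩ := p
      rw [hp] at h
      have := ih _ _ _ _ _ _ h
      simp at this
      omega

theorem runB_push (f : Nat) (totals : Int) (a b : Int) (r2 : List Int) (c m : Int)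
    (scores : List Int) (tl : List (Int × Int × List Int)) (h : (scores.length : Int) < c) :
    runB (f + 1) totals (a :: b :: r2) ((c, m, scores) :: tl) =
    runB f totals r2 ((a, b, ([] : List Int)) :: (c, m, scores) :: tl) := by
  simp only [runB]; rw [if_pos h]

theorem runB_pop_cons (f : Nat) (totals : Int) (rest : List Int) (c m : Int) (scores : List Int)
    (c2 m2 : Int) (s2 : List Int) (tl2 : List (Int × Int × List Int))
    (h : ¬ (scores.length : Int) < c) :
    runB (f + 1) totals rest ((c, m, scores) :: (c2, m2, s2) :: tl2) =
    runB f (totals + (pyTakeI rest m).sum) (pyDropI rest m)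
      ((c2, m2, s2 ++ [nodeValue c scores (pyTakeI rest m)]) :: tl2) := by
  simp only [runB]; rw [if_neg h]

theorem runB_pop_last (f : Nat) (totals : Int) (rest : List Int) (c m : Int)
    (scores : List Int) (h : ¬ (scores.length : Int) < c) :
    runB (f + 1) totals rest [(c, m, scores)] =
    some (totals + (pyTakeI rest m).sum, nodeValue c scores (pyTakeI rest m),
          pyDropI rest m) := by
  simp only [runB]; rw [if_neg h]

theorem Q_zero (child : List Int → Option (Int × Int × List Int))
    (t0 : Int) (s0 rest : List Int) (T : Int) (Sc R : List Int)
    (h : kidsF child 0 t0 s0 rest = some (T, Sc, R)) :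
    ∃ k, R.length + k ≤ rest.length ∧
      ∀ fB (Δ : Int) (c m : Int) tl,
        (s0.length : Int) + 0 = c →
        runB (fB + k) Δ rest ((c, m, s0) :: tl) =
        runB fB (Δ + (T - t0)) R ((c, m, Sc) :: tl) := by
  simp only [kidsF, Option.some.injEq, Prod.mk.injEq] at h
  obtain ⟨h1, h2, h3⟩ := h
  subst h1; subst h2; subst h3
  exact ⟨0, by omega, by intro fB Δ c m tl hc; simp⟩

-- the main simulation: one finished node of A corresponds to a push…pop excursion of B's machine
theorem PQ : ∀ f : Nat,
    (∀ r t s r', parseF f r = some (t, s, r') →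
      ∃ k, r'.length + k ≤ r.length ∧
        ∀ fB (totals : Int) (c m : Int) (scores : List Int) tl,
          (scores.length : Int) < c →
          runB (fB + k) totals r ((c, m, scores) :: tl) =
          runB fB (totals + t) r' ((c, m, scores ++ [s]) :: tl)) ∧
    (∀ n t0 s0 rest T Sc R, kidsF (parseF f) n t0 s0 rest = some (T, Sc, R) →
      ∃ k, R.length + k ≤ rest.length ∧
        ∀ fB (Δ : Int) (c m : Int) tl,
          (s0.length : Int) + n = c →
          runB (fB + k) Δ rest ((c, m, s0) :: tl) =
          runB fB (Δ + (T - t0)) R ((c, m, Sc) :: tl)) := by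
  intro f
  induction f with
  | zero =>
    constructor
    · intro r t s r' h; simp [parseF] at h
    · intro n
      cases n with
      | zero => intro t0 s0 rest T Sc R h; exact Q_zero _ _ _ _ _ _ _ h
      | succ n => intro t0 s0 rest T Sc R h; simp [kidsF, parseF] at h
  | succ f ih =>
    have hP : ∀ r t s r', parseF (f + 1) r = some (t, s, r') →
        ∃ k, r'.length + k ≤ r.length ∧
          ∀ fB (totals : Int) (c m : Int) (scores : List Int) tl,
            (scores.length : Int) < c →
            runB (fB + k) totals r ((c, m, scores) :: tl) =
            runB fB (totals + t) r' ((c, m, scores ++ [s]) :: tl) := by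
      intro r t s r' h
      match r with
      | [] => simp [parseF] at h
      | [x] => simp [parseF] at h
      | c0 :: m0 :: r0 =>
        simp only [parseF] at h
        cases hk : kidsF (parseF f) c0.toNat 0 [] r0 with
        | none => rw [hk] at h; simp at h
        | some p =>
          obtain ⟨T, Sc, d⟩ := p
          rw [hk] at h
          simp only [Option.some.injEq, Prod.mk.injEq] at h
          obtain ⟨ht, hs, hr⟩ := h
          by_cases hc0 : (0 : Int) < c0
          · obtain ⟨kk, hkl, htr⟩ := ih.2 c0.toNat 0 [] r0 T Sc d hk
            refine ⟨kk + 2, ?_, ?_⟩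
            · have h1 := pyDropI_len d m0
              rw [← hr]; simp only [List.length_cons]; omega
            · intro fB totals c m scores tl hlt
              rw [show fB + (kk + 2) = (fB + 1 + kk) + 1 by omega,
                  runB_push _ _ _ _ _ _ _ _ _ hlt]
              have hside : ((([] : List Int).length : Int) + c0.toNat = c0) := by
                simp [Int.toNat_of_nonneg hc0.le]
              rw [htr (fB + 1) totals c0 m0 ((c, m, scores) :: tl) hside]
              have hScl : Sc.length = c0.toNat := by
                have := kidsF_scores_len (parseF f) c0.toNat 0 [] r0 T Sc d hk
                simpa using this
              have hnl : ¬ ((Sc.length : Int) < c0) := by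
                rw [hScl, Int.toNat_of_nonneg hc0.le]; omega
              rw [runB_pop_cons _ _ _ _ _ _ _ _ _ _ hnl]
              rw [← ht, ← hs, ← hr]
              have : totals + (T - 0) + (pyTakeI d m0).sum =
                  totals + (T + (pyTakeI d m0).sum) := by ring
              rw [this]
          · have hz : c0.toNat = 0 := by omega
            rw [hz] at hk
            simp only [kidsF, Option.some.injEq, Prod.mk.injEq] at hk
            obtain ⟨hT, hSc, hd⟩ := hk
            refine ⟨2, ?_, ?_⟩
            · have h1 := pyDropI_len d m0
              have h2 : d.length = r0.length := by rw [hd]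
              rw [← hr]; simp only [List.length_cons]; omega
            · intro fB totals c m scores tl hlt
              rw [show fB + 2 = (fB + 1) + 1 by omega,
                  runB_push _ _ _ _ _ _ _ _ _ hlt]
              have hnl : ¬ ((([] : List Int).length : Int) < c0) := by simp; omega
              rw [runB_pop_cons _ _ _ _ _ _ _ _ _ _ hnl]
              rw [← ht, ← hs, ← hr, ← hT, ← hSc, ← hd]
              have : totals + (pyTakeI r0 m0).sum = totals + (0 + (pyTakeI r0 m0).sum) := by
                ring
              rw [← this]
    refine ⟨hP, ?_⟩
    intro n
    induction n with
    | zero => intro t0 s0 rest T Sc R h; exact Q_zero _ _ _ _ _ _ _ h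
    | succ n ihn =>
      intro t0 s0 rest T Sc R h
      simp only [kidsF] at h
      cases hp : parseF (f + 1) rest with
      | none => rw [hp] at h; simp at h
      | some p =>
        obtain ⟨t, s, r1⟩ := p
        rw [hp] at h
        simp only [] at h
        obtain ⟨k1, hl1, htr1⟩ := hP rest t s r1 hp
        obtain ⟨k2, hl2, htr2⟩ := ihn (t0 + t) (s0 ++ [s]) r1 T Sc R h
        refine ⟨k1 + k2, by clear h; omega, ?_⟩
        intro fB Δ c m tl hc
        have hlt : (s0.length : Int) < c := by push_cast at hc; omega
        rw [show fB + (k1 + k2) = (fB + k2) + k1 by omega,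
            htr1 (fB + k2) Δ c m s0 tl hlt]
        have hc2 : ((s0 ++ [s]).length : Int) + n = c := by
          simp only [List.length_append, List.length_cons, List.length_nil]; push_cast at hc ⊢; omega
        rw [htr2 fB (Δ + t) c m tl hc2]
        have : Δ + t + (T - (t0 + t)) = Δ + (T - t0) := by ring
        rw [this]

theorem root_run : ∀ f a b r2 t s r', parseF f (a :: b :: r2) = some (t, s, r') →
    ∃ k, k ≤ r2.length + 1 ∧ runB k 0 r2 [(a, b, ([] : List Int))] = some (t, s, r') := by
  intro f a b r2 t s r' h
  cases f with
  | zero => simp [parseF] at h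
  | succ f =>
    simp only [parseF] at h
    cases hk : kidsF (parseF f) a.toNat 0 [] r2 with
    | none => rw [hk] at h; simp at h
    | some p =>
      obtain ⟨T, Sc, d⟩ := p
      rw [hk] at h
      simp only [Option.some.injEq, Prod.mk.injEq] at h
      obtain ⟨ht, hs, hr⟩ := h
      by_cases ha : (0 : Int) < a
      · obtain ⟨kk, hkl, htr⟩ := (PQ f).2 a.toNat 0 [] r2 T Sc d hk
        refine ⟨kk + 1, by omega, ?_⟩
        have hside : ((([] : List Int).length : Int) + a.toNat = a) := by
          simp [Int.toNat_of_nonneg ha.le]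
        rw [show kk + 1 = 1 + kk by omega, htr 1 0 a b [] hside]
        have hScl : Sc.length = a.toNat := by
          have := kidsF_scores_len (parseF f) a.toNat 0 [] r2 T Sc d hk
          simpa using this
        have hnl : ¬ ((Sc.length : Int) < a) := by
          rw [hScl, Int.toNat_of_nonneg ha.le]; omega
        rw [runB_pop_last _ _ _ _ _ _ hnl, ← ht, ← hs, ← hr]
        have : 0 + (T - 0) + (pyTakeI d b).sum = T + (pyTakeI d b).sum := by ring
        rw [this]
      · have hz : a.toNat = 0 := by omega
        rw [hz] at hk
        simp only [kidsF, Option.some.injEq, Prod.mk.injEq] at hk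
        obtain ⟨hT, hSc, hd⟩ := hk
        refine ⟨1, by omega, ?_⟩
        have hnl : ¬ ((([] : List Int).length : Int) < a) := by simp; omega
        rw [runB_pop_last _ _ _ _ _ _ hnl, ← ht, ← hs, ← hr, ← hT, ← hSc, ← hd]

theorem runB_mono : ∀ f f' (t : Int) r st v, f ≤ f' → runB f t r st = some v →
    runB f' t r st = some v := by
  intro f
  induction f with
  | zero => intro f' t r st v hle h; simp [runB] at h
  | succ f ih =>
    intro f' t r st v hle h
    cases f' with
    | zero => omega
    | succ f' =>
      simp only [runB] at h ⊢
      match st with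
      | [] => exact h
      | (c, m, scores) :: tl =>
        dsimp only at h ⊢
        by_cases hlt : (scores.length : Int) < c
        · rw [if_pos hlt] at h ⊢
          match r with
          | [] => simp at h
          | [x] => simp at h
          | x :: y :: r2 => exact ih f' _ _ _ _ (by omega) h
        · rw [if_neg hlt] at h ⊢
          match tl with
          | [] => exact h
          | (c2, m2, s2) :: tl2 => exact ih f' _ _ _ _ (by omega) h

theorem wf_parse : ∀ f : Nat,
    (∀ r d, wfNode f r = some d → ∃ t s, parseF f r = some (t, s, d)) ∧
    (∀ n r d (t0 : Int) (s0 : List Int), wfKids (wfNode f) n r = some d →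
      ∃ T Sc, kidsF (parseF f) n t0 s0 r = some (T, Sc, d)) := by
  intro f
  induction f with
  | zero =>
    constructor
    · intro r d h; simp [wfNode] at h
    · intro n
      cases n with
      | zero =>
        intro r d t0 s0 h
        simp only [wfKids, Option.some.injEq] at h
        exact ⟨t0, s0, by simp [kidsF, h]⟩
      | succ n => intro r d t0 s0 h; simp [wfKids, wfNode] at h
  | succ f ih =>
    have hnode : ∀ r d, wfNode (f + 1) r = some d →
        ∃ t s, parseF (f + 1) r = some (t, s, d) := by
      intro r d h
      match r with
      | [] => simp [wfNode] at h
      | [x] => simp [wfNode] at h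
      | c :: m :: r0 =>
        simp only [wfNode] at h
        rw [Option.map_eq_some_iff] at h
        obtain ⟨d0, hk, hd⟩ := h
        obtain ⟨T, Sc, hkf⟩ := ih.2 c.toNat r0 d0 0 [] hk
        exact ⟨T + (pyTakeI d0 m).sum, nodeValue c Sc (pyTakeI d0 m), by
          simp only [parseF]; rw [hkf]; dsimp only; rw [hd]⟩
    refine ⟨hnode, ?_⟩
    intro n
    induction n with
    | zero =>
      intro r d t0 s0 h
      simp only [wfKids, Option.some.injEq] at h
      exact ⟨t0, s0, by simp [kidsF, h]⟩
    | succ n ihn =>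
      intro r d t0 s0 h
      simp only [wfKids] at h
      cases hp : wfNode (f + 1) r with
      | none => rw [hp] at h; simp at h
      | some r1 =>
        rw [hp] at h
        obtain ⟨t, s, hpf⟩ := hnode r r1 hp
        obtain ⟨T, Sc, hkf⟩ := ihn r1 d (t0 + t) (s0 ++ [s]) h
        exact ⟨T, Sc, by simp only [kidsF]; rw [hpf]; exact hkf⟩

-- ===== VERDICT (by name: the statement is the Claim_ definition above) =====
theorem parse_spec : Claim_equal_parse := by
  intro data hdom hpre
  unfold Spec_parse
  unfold Pre_parse at hpre
  obtain ⟨d, hd⟩ := Option.isSome_iff_exists.mp hpre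
  match data with
  | [] => simp [wfNode] at hd
  | [x] => simp [wfNode] at hd
  | a :: b :: r2 =>
    obtain ⟨t, s, hp⟩ := (wf_parse ((a :: b :: r2).length + 1)).1 _ d hd
    obtain ⟨k, hk, hrun⟩ := root_run _ a b r2 t s d hp
    have hB : runB (r2.length + 3) 0 r2 [(a, b, ([] : List Int))] = some (t, s, d) :=
      runB_mono k _ 0 r2 _ _ (by omega) hrun
    show parse (a :: b :: r2) = parse_alt (a :: b :: r2)
    unfold parse
    rw [hp]
    unfold parse_alt
    dsimp only
    rw [hB]
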